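-- pv_equiv track=rewrite | github.com/Edgardosalas/INF_111 | Python/Laboratorios/Lab10 Cadenas/Cambiar vocales por la siguiente vocal.py | sacarpalsbe
-- ===== SOURCE A (Python) =====
-- def sacarpalsbe(bsbe, ksbe):
--     bsbe=bsbe+" "
--     csbe=0; wsbe=""; vsbe=""
--     elesbe=len(bsbe)
--     for isbe in range(1, elesbe+1):
--         ysbe=bsbe[isbe-1:isbe]
--         if ysbe==" ":
--             csbe=csbe+1
--             if csbe==ksbe:
--                 wsbe=vsbe
--             vsbe=""
--         else:
--             vsbe=vsbe+ysbe
--     return wsbe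
-- ===== SOURCE B (Python) =====
-- def sacarpalsbe(bsbe, ksbe):
--     parts = bsbe.split(" ")
--     if 1 <= ksbe <= len(parts):
--         return parts[ksbe - 1]
--     return ""
-- ===== Notes on version B (the rewrite author's own statement) =====
-- stated objective: simpler
-- what changed: Replaces A's character-by-character scan with a running word buffer and a space counter by tokenizing once with split(" ") and returning the (ksbe-1)-th part, or "" when ksbe is out of range.
import Mathlib
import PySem

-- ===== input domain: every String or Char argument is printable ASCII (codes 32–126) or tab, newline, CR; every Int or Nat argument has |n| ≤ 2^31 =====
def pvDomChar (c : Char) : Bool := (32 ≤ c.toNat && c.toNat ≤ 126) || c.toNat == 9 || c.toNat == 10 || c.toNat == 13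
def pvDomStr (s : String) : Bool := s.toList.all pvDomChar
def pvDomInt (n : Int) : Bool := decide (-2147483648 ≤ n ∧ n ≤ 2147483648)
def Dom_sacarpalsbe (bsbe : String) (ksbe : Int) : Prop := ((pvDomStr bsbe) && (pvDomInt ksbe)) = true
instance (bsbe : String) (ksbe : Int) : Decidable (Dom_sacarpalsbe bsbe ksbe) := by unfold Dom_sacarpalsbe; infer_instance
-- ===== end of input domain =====

-- B replaces A's character-by-character scan (running word + space counter) with one
-- split(" ") and a single index lookup (objective: simpler).


-- ===== PORT A =====
-- one loop iteration of A (A reads bsbe[isbe-1:isbe], the single character at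
-- position isbe-1, so the loop is exactly a left fold over the characters in order)
def pvStepA (ksbe : Int) (st : Int × String × String) (ysbe : Char) : Int × String × String :=
  if ysbe = ' ' then
    let csbe := st.1 + 1
    (csbe, if csbe = ksbe then st.2.2 else st.2.1, "")
  else
    (st.1, st.2.1, st.2.2.push ysbe)

def sacarpalsbe (bsbe : String) (ksbe : Int) : String :=
  let bsbe := bsbe ++ " "
  let r := bsbe.toList.foldl (pvStepA ksbe) (0, "", "")
  r.2.1

-- ===== PORT B =====
-- Python's bsbe.split(" ") (nonempty separator) is PySem.Chars.splitOn on the char list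
def sacarpalsbe_alt (bsbe : String) (ksbe : Int) : String :=
  let parts := (PySem.Chars.splitOn bsbe.toList [' ']).map String.ofList
  if 1 ≤ ksbe ∧ ksbe ≤ (parts.length : Int) then
    (PySem.List.pyGet? parts (ksbe - 1)).getD ""
  else
    ""

-- ===== PRECONDITION & SPEC =====
def Spec_sacarpalsbe (bsbe : String) (ksbe : Int) (out : String) : Prop := out = sacarpalsbe_alt bsbe ksbe
instance (bsbe : String) (ksbe : Int) (out : String) : Decidable (Spec_sacarpalsbe bsbe ksbe out) := by unfold Spec_sacarpalsbe; infer_instance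

-- ===== CLAIM (what is proved, stated in full; the proofs are below) =====
def Claim_equal_sacarpalsbe : Prop := ∀ (bsbe : String) (ksbe : Int), Dom_sacarpalsbe bsbe ksbe → Spec_sacarpalsbe bsbe ksbe (sacarpalsbe bsbe ksbe)

-- ===== LEMMAS AND PROOFS =====

-- split of a char list on a single space, Python's s.split(" ")
def pvSplitChars : List Char → List (List Char)
  | [] => [[]]
  | c :: t =>
    if c = ' ' then [] :: pvSplitChars t
    else
      match pvSplitChars t with
      | [] => [[c]]
      | h :: r => (c :: h) :: r

lemma pvSplitChars_ne_nil (l : List Char) : pvSplitChars l ≠ [] := by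
  cases l with
  | nil => simp [pvSplitChars]
  | cons c t =>
    simp only [pvSplitChars]
    split
    · simp
    · cases h : pvSplitChars t <;> simp

lemma pvSplitChars_append (u l : List Char) (hu : ' ' ∉ u) :
    pvSplitChars (u ++ l) =
      (u ++ (pvSplitChars l).headD []) :: (pvSplitChars l).tail := by
  induction u with
  | nil =>
    cases h : pvSplitChars l with
    | nil => exact absurd h (pvSplitChars_ne_nil l)
    | cons a r => simp [h]
  | cons c u ih =>
    have hc : c ≠ ' ' := fun h => hu (h ▸ List.mem_cons_self)
    have hu' : ' ' ∉ u := fun h => hu (List.mem_cons_of_mem _ h)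
    simp only [List.cons_append, pvSplitChars, if_neg hc, ih hu']

lemma pvSplitChars_nospace (u : List Char) (hu : ' ' ∉ u) :
    pvSplitChars u = [u] := by
  have := pvSplitChars_append u [] hu
  simpa [pvSplitChars] using this

lemma pvSplitChars_space (u t : List Char) (hu : ' ' ∉ u) :
    pvSplitChars (u ++ ' ' :: t) = u :: pvSplitChars t := by
  rw [pvSplitChars_append u (' ' :: t) hu]
  simp [pvSplitChars]

-- PySem.Chars.splitOn with separator [' '] computes pvSplitChars
lemma splitOn_go_eq (l : List Char) : ∀ (fuel : Nat) (cur : List Char) (acc : List (List Char)),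
    l.length < fuel →
    PySem.Chars.splitOn.go [' '] fuel l cur acc =
      acc.reverse ++ (cur.reverse ++ (pvSplitChars l).headD []) :: (pvSplitChars l).tail := by
  induction l with
  | nil =>
    intro fuel cur acc h
    match fuel with
    | fuel + 1 => simp [PySem.Chars.splitOn.go, pvSplitChars]
  | cons c t ih =>
    intro fuel cur acc h
    match fuel with
    | fuel + 1 =>
      by_cases hc : c = ' '
      · subst hc
        have hp : List.isPrefixOf [' '] (' ' :: t) = true := by simp [List.isPrefixOf]
        rw [PySem.Chars.splitOn.go, if_pos hp]
        simp only [List.length_cons] at h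
        have hd : List.drop [' '].length (' ' :: t) = t := rfl
        rw [hd, ih fuel [] (cur.reverse :: acc) (by omega)]
        cases hps : pvSplitChars t with
        | nil => exact absurd hps (pvSplitChars_ne_nil t)
        | cons a r => simp [pvSplitChars, hps]
      · have hp : List.isPrefixOf [' '] (c :: t) = false := by
          simp [List.isPrefixOf]; exact fun h => absurd h.symm hc
        rw [PySem.Chars.splitOn.go, if_neg (by simp [hp])]
        simp only [List.length_cons] at h
        rw [ih fuel (c :: cur) acc (by omega)]
        cases hps : pvSplitChars t with
        | nil => exact absurd hps (pvSplitChars_ne_nil t)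
        | cons a r => simp [pvSplitChars, if_neg hc, hps]

lemma splitOn_eq (l : List Char) : PySem.Chars.splitOn l [' '] = pvSplitChars l := by
  rw [PySem.Chars.splitOn, splitOn_go_eq l (l.length + 1) [] [] (by omega)]
  cases hps : pvSplitChars l with
  | nil => exact absurd hps (pvSplitChars_ne_nil l)
  | cons a r => simp

-- loop invariant for A's scan: after consuming t ++ [' '] from state (c, w, v)
-- (v space-free), the w-component is the (ksbe - c)-th piece of v.toList ++ t if
-- that index is in range, else the old w
lemma foldA_inv (k : Int) : ∀ (t : List Char) (c : Int) (w v : String), ' ' ∉ v.toList →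
    ((t ++ [' ']).foldl (pvStepA k) (c, w, v)).2.1 =
      (if c < k ∧ k ≤ c + ((pvSplitChars (v.toList ++ t)).length : Int)
       then String.ofList ((pvSplitChars (v.toList ++ t)).getD (k - c - 1).toNat [])
       else w) := by
  intro t
  induction t with
  | nil =>
    intro c w v hv
    simp only [List.append_nil]
    rw [pvSplitChars_nospace v.toList hv]
    simp only [List.nil_append, List.foldl_cons, List.foldl_nil, pvStepA, reduceIte]
    by_cases hk : c + 1 = k
    · have h1 : c < k ∧ k ≤ c + (([v.toList] : List (List Char)).length : Int) := by
        simp; omega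
      have h2 : (k - c - 1).toNat = 0 := by omega
      simp [hk, h1, h2]
    · have h1 : ¬(c < k ∧ k ≤ c + (([v.toList] : List (List Char)).length : Int)) := by
        simp; omega
      rw [if_neg hk, if_neg h1]
  | cons y t ih =>
    intro c w v hv
    by_cases hy : y = ' '
    · subst hy
      simp only [List.cons_append, List.foldl_cons, pvStepA, reduceIte]
      rw [ih (c + 1) (if c + 1 = k then v else w) "" (by simp)]
      rw [pvSplitChars_space v.toList t hv]
      simp only [String.toList_empty, List.nil_append, List.length_cons]
      by_cases hk : c + 1 = k
      · have h1 : ¬(c + 1 < k ∧ k ≤ c + 1 + ((pvSplitChars t).length : Int)) := by omega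
        have h3 : (k - c - 1).toNat = 0 := by omega
        simp only [if_neg h1, if_pos hk]
        rw [if_pos (by push_cast; omega)]
        simp [h3, String.ofList]
      · by_cases h4 : c + 1 < k ∧ k ≤ c + 1 + ((pvSplitChars t).length : Int)
        · have h6 : (k - c - 1).toNat = (k - (c + 1) - 1).toNat + 1 := by omega
          simp only [if_pos h4, if_neg hk]
          rw [if_pos (by push_cast; omega), h6]
          simp
        · simp only [if_neg h4, if_neg hk]
          rw [if_neg (by push_cast; omega)]
    · simp only [List.cons_append, List.foldl_cons, pvStepA, if_neg hy]
      rw [ih c w (v.push y) (by simp; exact ⟨hv, fun h => hy h.symm⟩)]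
      simp
theorem sacarpalsbe_spec : Claim_equal_sacarpalsbe := by
  intro bsbe ksbe _
  unfold Spec_sacarpalsbe sacarpalsbe sacarpalsbe_alt
  rw [splitOn_eq]
  have hl : (bsbe ++ " ").toList = bsbe.toList ++ [' '] := by simp
  simp only [hl]
  rw [foldA_inv ksbe bsbe.toList 0 "" "" (by simp)]
  simp only [String.toList_empty, List.nil_append, Int.zero_add, List.length_map]
  by_cases h : 0 < ksbe ∧ ksbe ≤ ((pvSplitChars bsbe.toList).length : Int)
  · have hlt : (ksbe - 1).toNat < (pvSplitChars bsbe.toList).length := by omega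
    have hcast : ksbe - 1 = ((ksbe - 1).toNat : Int) := by omega
    rw [if_pos h, if_pos (by constructor <;> omega), hcast, PySem.List.pyGet?_natCast]
    rw [List.getElem?_eq_getElem (by simpa using hlt)]
    have h0 : ksbe - 0 - 1 = ksbe - 1 := by omega
    rw [h0]
    have hlt2 : ksbe.toNat - 1 < (pvSplitChars bsbe.toList).length := by omega
    simp [List.getD_eq_getElem?_getD, List.getElem?_eq_getElem hlt2]
  · rw [if_neg h, if_neg (by omega)]
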